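-- pv_equiv track=rewrite | github.com/AlbinoLoaf/brAIncells | utils/graph_utils.py | get_bary_counts
-- ===== SOURCE A (Python) =====
-- from collections import Counter
--
-- def get_bary_counts(bary_dict):
--     """
--     Get barycenter counts by channel, overall, and the raw barycenter values
--
--     Parameters
--     -----------
--     bary_dict: dict
--         Dictionary of the form dict[channels] containing the
--         barycenters for the model adj matrices
--
--     Returns
--     -----
--     freqs_by_chan: dict
--         The node(s) that are the barycenter for each model, gruped by channels
--         Dictionary of the form dict[channels]
--     node_counts_all: list
--         Counts for each electrode being a barycenter (for all the models)
--     all_bary: list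
--         Raw barycenter values (electrode labels) for all models as a list
--     """
--     freqs_by_chan = dict()
--     all_bary = []
--     for n_chans in bary_dict.keys():
--         bary_list = []
--         [bary_list.extend(x) for x in bary_dict[n_chans]]
--         all_bary.extend(bary_list)
--         node_counts = dict(sorted(Counter(bary_list).items()))
--         node_counts = list(node_counts.values())
--         freqs_by_chan[n_chans] = node_counts
--
--     node_counts_all = dict(sorted(Counter(all_bary).items()))
--     node_counts_all = list(node_counts_all.values())
--
--     return freqs_by_chan, node_counts_all, all_bary
-- ===== SOURCE B (Python) =====
-- def _run_lengths(s):
--     # run-length counts of an already-sorted list, one pass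
--     out = []
--     prev = None
--     cnt = 0
--     for x in s:
--         if cnt > 0 and x == prev:
--             cnt += 1
--         else:
--             if cnt > 0:
--                 out.append(cnt)
--             prev = x
--             cnt = 1
--     if cnt > 0:
--         out.append(cnt)
--     return out
--
--
-- def get_bary_counts(bary_dict):
--     freqs_by_chan = {}
--     all_bary = []
--     for n_chans, mats in bary_dict.items():
--         bary_list = [x for mat in mats for x in mat]
--         all_bary += bary_list
--         freqs_by_chan[n_chans] = _run_lengths(sorted(bary_list))
--     return freqs_by_chan, _run_lengths(sorted(all_bary)), all_bary
-- ===== Notes on version B (the rewrite author's own statement) =====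
-- stated objective: alternative
-- what changed: Per-channel and overall counts are produced by sorting the barycenter list and run-length-encoding it in one pass, instead of building a Counter dict, sorting its items and re-building a dict to read its values.
import Mathlib
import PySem

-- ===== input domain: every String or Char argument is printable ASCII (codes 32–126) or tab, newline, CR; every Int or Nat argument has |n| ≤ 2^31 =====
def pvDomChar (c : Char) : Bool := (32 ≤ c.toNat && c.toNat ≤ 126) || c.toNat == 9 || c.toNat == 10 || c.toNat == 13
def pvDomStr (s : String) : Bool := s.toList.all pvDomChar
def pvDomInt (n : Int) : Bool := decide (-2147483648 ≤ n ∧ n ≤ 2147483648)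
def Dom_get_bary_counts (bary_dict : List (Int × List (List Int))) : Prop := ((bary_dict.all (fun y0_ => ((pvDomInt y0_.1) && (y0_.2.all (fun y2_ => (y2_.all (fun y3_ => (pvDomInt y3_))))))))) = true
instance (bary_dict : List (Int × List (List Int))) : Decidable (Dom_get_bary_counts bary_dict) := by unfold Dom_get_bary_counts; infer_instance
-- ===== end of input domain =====

-- B computes the per-label counts by sorting the list and run-length-encoding it in one
-- pass, instead of A's Counter dict whose items are sorted and re-packed into a dict.

-- ===== PORT A =====
-- node_counts = list(dict(sorted(Counter(bary_list).items())).values())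
def pvACounts (xs : List Int) : List Int :=
  (PySem.Dict.ofList (PySem.List.sorted2 (PySem.Dict.counter xs).items Prod.fst Prod.snd)).values

def get_bary_counts (bary_dict : List (Int × List (List Int))) : (List (Int × List Int)) × List Int × List Int :=
  let d := PySem.Dict.ofList bary_dict
  let st := d.keys.foldl (fun (st : PySem.Dict Int (List Int) × List Int) n_chans =>
      -- [bary_list.extend(x) for x in bary_dict[n_chans]]
      let bary_list := (d.getD n_chans []).foldl (fun acc x => acc ++ x) []
      (st.1.insert n_chans (pvACounts bary_list), st.2 ++ bary_list))
    (PySem.Dict.empty, [])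
  (st.1.items, pvACounts st.2, st.2)

-- ===== PORT B =====
-- _run_lengths: one pass over the sorted list with (out, prev, cnt) accumulators
def pvBStep (st : List Int × Int × Int) (x : Int) : List Int × Int × Int :=
  if 0 < st.2.2 ∧ x = st.2.1 then (st.1, st.2.1, st.2.2 + 1)
  else ((if 0 < st.2.2 then st.1 ++ [st.2.2] else st.1), x, 1)

def pvRunLengths (s : List Int) : List Int :=
  let st := s.foldl pvBStep ([], 0, 0)
  if 0 < st.2.2 then st.1 ++ [st.2.2] else st.1

def pvBCounts (xs : List Int) : List Int :=
  pvRunLengths (PySem.List.sorted xs (fun x => x))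

def get_bary_counts_alt (bary_dict : List (Int × List (List Int))) : (List (Int × List Int)) × List Int × List Int :=
  let d := PySem.Dict.ofList bary_dict
  let st := d.items.foldl (fun (st : PySem.Dict Int (List Int) × List Int) p =>
      let bary_list := p.2.flatten
      (st.1.insert p.1 (pvBCounts bary_list), st.2 ++ bary_list))
    (PySem.Dict.empty, [])
  (st.1.items, pvBCounts st.2, st.2)

-- ===== PRECONDITION & SPEC =====
def Spec_get_bary_counts (bary_dict : List (Int × List (List Int))) (out : (List (Int × List Int)) × List Int × List Int) : Prop := out = get_bary_counts_alt bary_dict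
instance (bary_dict : List (Int × List (List Int))) (out : (List (Int × List Int)) × List Int × List Int) : Decidable (Spec_get_bary_counts bary_dict out) := by unfold Spec_get_bary_counts; infer_instance

-- ===== CLAIM (what is proved, stated in full; the proofs are below) =====
def Claim_equal_get_bary_counts : Prop := ∀ (bary_dict : List (Int × List (List Int))), Dom_get_bary_counts bary_dict → Spec_get_bary_counts bary_dict (get_bary_counts bary_dict)

-- ===== LEMMAS AND PROOFS =====

-- recursive specification of B's run-length pass
def pvRuns : Int → Int → List Int → List Int
  | _,    cnt, []     => [cnt]
  | prev, cnt, x :: t => if x = prev then pvRuns prev (cnt + 1) t else cnt :: pvRuns x 1 t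

theorem pvFold_runs (s : List Int) : ∀ (out : List Int) (prev cnt : Int), 0 < cnt →
    (if 0 < (s.foldl pvBStep (out, prev, cnt)).2.2
     then (s.foldl pvBStep (out, prev, cnt)).1 ++ [(s.foldl pvBStep (out, prev, cnt)).2.2]
     else (s.foldl pvBStep (out, prev, cnt)).1)
    = out ++ pvRuns prev cnt s := by
  induction s with
  | nil => intro out prev cnt hc; simp [pvRuns, hc]
  | cons x t ih =>
      intro out prev cnt hc
      by_cases hxp : x = prev
      · have h1 : pvBStep (out, prev, cnt) x = (out, prev, cnt + 1) := by
          simp [pvBStep, hc, hxp]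
        rw [List.foldl_cons, h1, ih out prev (cnt + 1) (by omega)]
        simp [pvRuns, hxp]
      · have h1 : pvBStep (out, prev, cnt) x = (out ++ [cnt], x, 1) := by
          simp [pvBStep, hxp, hc]
        rw [List.foldl_cons, h1, ih (out ++ [cnt]) x 1 (by omega)]
        simp [pvRuns, hxp]

theorem pvRuns_sorted (s : List Int) (hs : s.Pairwise (· ≤ ·)) :
    ∀ (prev cnt : Int), (∀ z ∈ s, prev ≤ z) →
      pvRuns prev cnt s
      = (cnt + (s.count prev : Int)) ::
          ((PySem.Set.ofList s).discard prev).map (fun k => (s.count k : Int)) := by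
  induction s with
  | nil =>
      intro prev cnt _
      simp [pvRuns, PySem.Set.ofList, PySem.Set.discard]
  | cons x t ih =>
      intro prev cnt hlb
      have hx : ∀ z ∈ t, x ≤ z := fun z hz => List.rel_of_pairwise_cons hs hz
      have ht : t.Pairwise (· ≤ ·) := hs.of_cons
      by_cases hxp : x = prev
      · subst hxp
        rw [show pvRuns x cnt (x :: t) = pvRuns x (cnt + 1) t by simp [pvRuns],
            ih ht x (cnt + 1) hx]
        have hset : (PySem.Set.ofList (x :: t)).discard x = (PySem.Set.ofList t).discard x := by
          rw [PySem.Set.ofList_cons]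
          simp [PySem.Set.discard, List.filter_filter]
        rw [hset]
        have hhd : ((x :: t).count x : Int) = (t.count x : Int) + 1 := by
          simp
        rw [hhd]
        have htl : ∀ k ∈ (PySem.Set.ofList t).discard x,
            (fun k => ((t.count k : Int))) k = (fun k => (((x :: t).count k : Int))) k := by
          intro k hk
          have hkx : k ≠ x := ((PySem.Set.mem_discard _ _ _).mp hk).2
          simp [hkx.symm]
        rw [List.map_congr_left htl]
        have : cnt + 1 + (t.count x : Int) = cnt + ((t.count x : Int) + 1) := by ring
        rw [this]
      · have hpx : prev < x := lt_of_le_of_ne (hlb x (by simp)) (fun h => hxp h.symm)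
        have hpt : ∀ z ∈ t, z ≠ prev := fun z hz h =>
          absurd (h ▸ hx z hz) (not_le.mpr hpx)
        rw [show pvRuns prev cnt (x :: t) = cnt :: pvRuns x 1 t by simp [pvRuns, hxp],
            ih ht x 1 hx]
        have hcp : ((x :: t).count prev : Int) = 0 := by
          have : (x :: t).count prev = 0 := by
            rw [List.count_eq_zero]
            intro h
            rcases List.mem_cons.mp h with h | h
            · exact hxp h.symm
            · exact hpt prev h rfl
          simp [this]
        have hset : (PySem.Set.ofList (x :: t)).discard prev
            = x :: (PySem.Set.ofList t).discard x := by
          rw [PySem.Set.ofList_cons]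
          have h1 : (x == prev) = false := by simpa using hxp
          simp only [PySem.Set.discard, List.filter_cons, h1, Bool.not_false, if_true]
          congr 1
          rw [List.filter_filter]
          apply List.filter_congr
          intro z hz
          have hzt : z ∈ t := (PySem.Set.mem_ofList t z).mp hz
          have : (z == prev) = false := by simpa using hpt z hzt
          simp [this]
        rw [hset, hcp]
        have hhd : ((x :: t).count x : Int) = (t.count x : Int) + 1 := by
          simp
        have htl : ∀ k ∈ (PySem.Set.ofList t).discard x,
            (fun k => ((t.count k : Int))) k = (fun k => (((x :: t).count k : Int))) k := by
          intro k hk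
          have hkx : k ≠ x := ((PySem.Set.mem_discard _ _ _).mp hk).2
          simp [hkx.symm]
        rw [List.map_cons, List.map_congr_left htl, hhd]
        simp
        ring

theorem pvRunLengths_sorted (s : List Int) (hs : s.Pairwise (· ≤ ·)) :
    pvRunLengths s = (PySem.Set.ofList s).map (fun k => (s.count k : Int)) := by
  cases s with
  | nil => simp [pvRunLengths, PySem.Set.ofList]
  | cons x t =>
      have hx : ∀ z ∈ t, x ≤ z := fun z hz => List.rel_of_pairwise_cons hs hz
      have ht : t.Pairwise (· ≤ ·) := hs.of_cons
      have h0 : pvBStep ([], 0, 0) x = ([], x, 1) := by simp [pvBStep]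
      unfold pvRunLengths
      rw [List.foldl_cons, h0, pvFold_runs t [] x 1 (by omega), pvRuns_sorted t ht x 1 hx]
      have hset : PySem.Set.ofList (x :: t) = x :: (PySem.Set.ofList t).discard x :=
        PySem.Set.ofList_cons x t
      rw [hset, List.map_cons]
      have hhd : ((x :: t).count x : Int) = 1 + (t.count x : Int) := by
        simp; ring
      have htl : ∀ k ∈ (PySem.Set.ofList t).discard x,
          (fun k => ((t.count k : Int))) k = (fun k => (((x :: t).count k : Int))) k := by
        intro k hk
        have hkx : k ≠ x := ((PySem.Set.mem_discard _ _ _).mp hk).2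
        simp [hkx.symm]
      rw [List.map_congr_left htl, hhd]
      simp

theorem pvSet_sorted_lt (s : List Int) (hs : s.Pairwise (· ≤ ·)) :
    (PySem.Set.ofList s).Pairwise (· < ·) := by
  induction s with
  | nil => simp [PySem.Set.ofList]
  | cons x t ih =>
      have hx : ∀ z ∈ t, x ≤ z := fun z hz => List.rel_of_pairwise_cons hs hz
      have ht : t.Pairwise (· ≤ ·) := hs.of_cons
      rw [PySem.Set.ofList_cons]
      refine List.pairwise_cons.mpr ⟨?_, ?_⟩
      · intro z hz
        have h1 := (PySem.Set.mem_discard _ _ _).mp hz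
        have hzt : z ∈ t := (PySem.Set.mem_ofList t z).mp h1.1
        exact lt_of_le_of_ne (hx z hzt) (Ne.symm h1.2)
      · exact (ih ht).filter _

theorem pvBCounts_eq (xs : List Int) :
    pvBCounts xs
    = (PySem.List.sorted (PySem.Set.ofList xs) (fun k => k)).map (fun k => (xs.count k : Int)) := by
  have hs : (PySem.List.sorted xs (fun x => x)).Pairwise (· ≤ ·) :=
    PySem.List.sorted_pairwise xs (fun x => x)
  have hcnt : ∀ k : Int, (PySem.List.sorted xs (fun x => x)).count k = xs.count k :=
    fun k => (PySem.List.sorted_perm xs (fun x => x) false).count_eq k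
  have hset : PySem.Set.ofList (PySem.List.sorted xs (fun x => x))
      = PySem.List.sorted (PySem.Set.ofList xs) (fun k => k) := by
    refine (PySem.List.sorted_eq_of_perm_of_pairwise_lt _ _ _ ?_ ?_).symm
    · refine (List.perm_ext_iff_of_nodup (PySem.Set.nodup_ofList _) (PySem.Set.nodup_ofList _)).mpr ?_
      intro a
      rw [PySem.Set.mem_ofList, PySem.Set.mem_ofList]
      exact ⟨fun h => (PySem.List.sorted_perm xs (fun x => x) false).mem_iff.mp h,
             fun h => (PySem.List.sorted_perm xs (fun x => x) false).mem_iff.mpr h⟩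
    · exact pvSet_sorted_lt _ hs
  unfold pvBCounts
  rw [pvRunLengths_sorted _ hs, hset]
  exact List.map_congr_left (fun k _ => by rw [hcnt k])

-- insertion with one comparison function equals insertion with another that agrees on S
theorem pvInsertBy_congr {α : Type} (b1 b2 : α → α → Bool) (x : α) :
    ∀ ys : List α, (∀ y ∈ ys, b1 x y = b2 x y) →
      PySem.List.insertBy b1 x ys = PySem.List.insertBy b2 x ys := by
  intro ys
  induction ys with
  | nil => intro _; rfl
  | cons y t ih =>
      intro h
      have hy : b1 x y = b2 x y := h y (by simp)
      simp only [PySem.List.insertBy]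
      rw [hy]
      by_cases hb : b2 x y = true
      · simp [hb]
      · simp [hb, ih (fun z hz => h z (by simp [hz]))]

theorem pvFoldl_insertBy_congr {α : Type} (b1 b2 : α → α → Bool) (S : α → Prop)
    (hb : ∀ a b, S a → S b → b1 a b = b2 a b) :
    ∀ (l acc : List α), (∀ z ∈ l, S z) → (∀ z ∈ acc, S z) →
      l.foldl (fun acc x => PySem.List.insertBy b1 x acc) acc
      = l.foldl (fun acc x => PySem.List.insertBy b2 x acc) acc := by
  intro l
  induction l with
  | nil => intro acc _ _; rfl
  | cons x t ih =>
      intro acc hl hacc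
      have hx : S x := hl x (by simp)
      rw [List.foldl_cons, List.foldl_cons,
          pvInsertBy_congr b1 b2 x acc (fun y hy => hb x y hx (hacc y hy))]
      exact ih _ (fun z hz => hl z (by simp [hz]))
        (fun z hz => by
          rcases (PySem.List.mem_insertBy b2 x z acc).mp hz with h | h
          · exact h ▸ hx
          · exact hacc z h)

-- A's tuple-sort of counter items is a key-sort (keys are distinct)
theorem pvSorted2_counter (xs : List Int) :
    PySem.List.sorted2 (PySem.Dict.counter xs).items Prod.fst Prod.snd
    = PySem.List.sorted (PySem.Dict.counter xs).items Prod.fst := by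
  have h2 : PySem.List.sorted2 (PySem.Dict.counter xs).items Prod.fst Prod.snd
      = (PySem.Dict.counter xs).items.foldl
          (fun acc x => PySem.List.insertBy
            (fun a b => decide (a.1 < b.1) || (!decide (b.1 < a.1) && decide (a.2 < b.2)))
            x acc) [] := rfl
  rw [h2, PySem.List.sorted_eq_foldl_insertBy]
  refine pvFoldl_insertBy_congr _ _ (fun p => p ∈ (PySem.Dict.counter xs).items) ?_ _ _
    (fun z hz => hz) (by simp)
  intro a b ha hb
  rw [PySem.Dict.items_counter] at ha hb
  rcases List.mem_map.mp ha with ⟨ka, _, rfl⟩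
  rcases List.mem_map.mp hb with ⟨kb, _, rfl⟩
  by_cases hk : ka = kb
  · subst hk; simp
  · rcases lt_or_gt_of_ne hk with h | h
    · simp [h, asymm h]
    · simp [h, asymm h]

theorem pvACounts_eq (xs : List Int) :
    pvACounts xs
    = (PySem.List.sorted (PySem.Set.ofList xs) (fun k => k)).map (fun k => (xs.count k : Int)) := by
  have hys : PySem.List.sorted (PySem.Dict.counter xs).items Prod.fst
      = (PySem.List.sorted (PySem.Set.ofList xs) (fun k => k)).map
          (fun k => (k, (xs.count k : Int))) := by
    refine PySem.List.sorted_eq_of_perm_of_pairwise_lt _ _ _ ?_ ?_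
    · rw [PySem.Dict.items_counter]
      exact (PySem.List.sorted_perm (PySem.Set.ofList xs) (fun k => k) false).map _
    · exact List.pairwise_map.mpr (by
        simpa using PySem.List.sorted_ofList_pairwise_lt xs)
  have hnodup : ((PySem.List.sorted (PySem.Set.ofList xs) (fun k => k)).map
      (fun k => (k, (xs.count k : Int))) |>.map Prod.fst).Nodup := by
    rw [List.map_map]
    have h1 : List.map (Prod.fst ∘ fun k => ((k, (xs.count k : Int)) : Int × Int))
        (PySem.List.sorted (PySem.Set.ofList xs) fun k => k)
        = PySem.List.sorted (PySem.Set.ofList xs) fun k => k := by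
      have hc : (Prod.fst ∘ fun k : Int => ((k, (xs.count k : Int)) : Int × Int))
          = fun k : Int => k := by funext k; rfl
      rw [hc, List.map_id']
    rw [h1]
    exact ((PySem.List.sorted_ofList_pairwise_lt xs).imp (fun h => ne_of_lt h))
  unfold pvACounts
  rw [pvSorted2_counter, hys]
  have hitems : (PySem.Dict.ofList ((PySem.List.sorted (PySem.Set.ofList xs) (fun k => k)).map
      (fun k => (k, (xs.count k : Int))))).items
      = (PySem.List.sorted (PySem.Set.ofList xs) (fun k => k)).map
          (fun k => (k, (xs.count k : Int))) := by
    show (List.foldl (fun (acc : PySem.Dict Int Int) (p : Int × Int) => acc.insert p.1 p.2) PySem.Dict.empty _).items = _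
    rw [PySem.Dict.items_foldl_insert_fresh _ Prod.fst Prod.snd PySem.Dict.empty
        (fun a _ => PySem.Dict.contains_empty a.1) hnodup]
    simp [PySem.Dict.empty, Function.comp]
  unfold PySem.Dict.values
  rw [hitems, List.map_map]
  simp [Function.comp]

theorem pvCounts_eq (xs : List Int) : pvACounts xs = pvBCounts xs := by
  rw [pvACounts_eq, pvBCounts_eq]

-- ===== VERDICT (by name: the statement is the Claim_ definition above) =====
theorem get_bary_counts_spec : Claim_equal_get_bary_counts := by
  intro bary_dict _
  unfold Spec_get_bary_counts
  simp only [get_bary_counts, get_bary_counts_alt]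
  have hnd : (PySem.Dict.ofList bary_dict).keys.Nodup := PySem.Dict.nodup_keys_ofList bary_dict
  have hkeys : (PySem.Dict.ofList bary_dict).keys
      = (PySem.Dict.ofList bary_dict).items.map Prod.fst := rfl
  rw [hkeys, List.foldl_map]
  have hfold :
      (PySem.Dict.ofList bary_dict).items.foldl
        (fun (st : PySem.Dict Int (List Int) × List Int) p =>
          (st.1.insert p.1 (pvACounts (((PySem.Dict.ofList bary_dict).getD p.1 []).foldl
              (fun acc x => acc ++ x) [])),
           st.2 ++ ((PySem.Dict.ofList bary_dict).getD p.1 []).foldl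
              (fun acc x => acc ++ x) []))
        (PySem.Dict.empty, [])
      = (PySem.Dict.ofList bary_dict).items.foldl
          (fun (st : PySem.Dict Int (List Int) × List Int) p =>
            (st.1.insert p.1 (pvBCounts p.2.flatten), st.2 ++ p.2.flatten))
          (PySem.Dict.empty, []) := by
    refine PySem.List.foldl_congr_mem _ _ _ _ ?_
    intro acc p hp
    have hget : (PySem.Dict.ofList bary_dict).getD p.1 [] = p.2 :=
      PySem.Dict.getD_of_mem_items _ (by simpa using hp) hnd []
    rw [hget, PySem.List.foldl_append_eq_flatten, List.nil_append, pvCounts_eq]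
  simp only at hfold ⊢
  rw [hfold, pvCounts_eq]
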